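-- pv_equiv track=rewrite | github.com/wmk2233/Cloud_IP_Mapping | nmap.py | parse_nmap_result
-- ===== SOURCE A (Python) =====
-- def parse_nmap_result(scan_output):
--     parsed_data = []
--     lines = scan_output.split('\n')
--     ip = None
--     for line in lines:
--         if 'Nmap scan report for' in line:
--             ip = line.split()[-1]
--         if '/tcp' in line:
--             parts = line.split()
--             port = parts[0].split('/')[0]
--             state = parts[1]
--             service = parts[2] if len(parts) > 2 else ''
--             parsed_data.append([ip, port, service, state])
--     return parsed_data
-- ===== SOURCE B (Python) =====
-- def _row(ip, line):
--     parts = line.split()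
--     return [ip, parts[0].split('/')[0],
--             parts[2] if len(parts) > 2 else '', parts[1]]
--
--
-- def parse_nmap_result(scan_output):
--     # Partition the lines into per-host blocks: each 'Nmap scan report for'
--     # header starts a new block (the header line itself belongs to it); lines
--     # before the first header form a leading block with ip None.
--     lines = scan_output.split('\n')
--     blocks = []
--     ip, seg = None, []
--     for line in lines:
--         if 'Nmap scan report for' in line:
--             blocks.append((ip, seg))
--             ip, seg = line.split()[-1], [line]
--         else:
--             seg.append(line)
--     blocks.append((ip, seg))
--     return [_row(ip, line)
--             for ip, seg in blocks
--             for line in seg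
--             if '/tcp' in line]
-- ===== Notes on version B (the rewrite author's own statement) =====
-- stated objective: alternative
-- what changed: B partitions the lines into per-host blocks (one per 'Nmap scan report for' header, plus a leading ip-less block), then emits the rows of each block by a comprehension, instead of A's single flat loop carrying a mutable current-ip; both are one pass, O(n).
-- outside the precondition, e.g. on parse_nmap_result('/tcp'): A raises IndexError, B raises IndexError; on parse_nmap_result('Nmap scan report for 1.2.3.4\n80/tcp'): A raises IndexError, B raises IndexError
import Mathlib
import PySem

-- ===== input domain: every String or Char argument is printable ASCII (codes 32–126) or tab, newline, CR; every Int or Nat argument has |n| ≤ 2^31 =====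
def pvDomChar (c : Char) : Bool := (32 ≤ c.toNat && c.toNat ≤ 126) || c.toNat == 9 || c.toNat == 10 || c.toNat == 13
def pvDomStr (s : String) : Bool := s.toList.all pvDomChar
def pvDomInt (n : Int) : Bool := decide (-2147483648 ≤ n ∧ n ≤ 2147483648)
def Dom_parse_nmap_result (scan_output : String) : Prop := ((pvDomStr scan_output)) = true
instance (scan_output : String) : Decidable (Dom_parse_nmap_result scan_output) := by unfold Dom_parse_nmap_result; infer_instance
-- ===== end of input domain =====

-- B re-parses the scan by partitioning the lines into per-host blocks instead of A's
-- flat loop with a mutable current ip; same one-pass cost ("alternative" objective).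

-- ===== PORT A =====
-- Python's `ip` variable is None before the first header: modelled as Option String.
-- `pvIpVal none = "None"` is only reached outside Pre_ (a '/tcp' line before any header,
-- where Python's row holds None, not a str).  The `.getD` defaults on parts[0],
-- line.split()[-1] and parts[0].split('/')[0] are unreachable (those lists are
-- provably nonempty on the lines that take the branch); parts[1] (`.getD ""` on
-- pyGet? parts 1) is Python's IndexError, excluded by Pre_.
def pvIpVal : Option String → String
  | some s => s
  | none => "None"

def pvStepA (st : Option String × List (List String)) (line : String) :
    Option String × List (List String) :=
  let ip := if PySem.Str.isIn "Nmap scan report for" line then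
              PySem.List.pyGet? (PySem.Str.split₀ line) (-1)
            else st.1
  if PySem.Str.isIn "/tcp" line then
    let parts := PySem.Str.split₀ line
    let port := (PySem.List.pyGet?
        ((PySem.Str.split? ((PySem.List.pyGet? parts 0).getD "") "/").getD []) 0).getD ""
    let state := (PySem.List.pyGet? parts 1).getD ""
    let service := if parts.length > 2 then (PySem.List.pyGet? parts 2).getD "" else ""
    (ip, st.2 ++ [[pvIpVal ip, port, service, state]])
  else (ip, st.2)

def parse_nmap_result (scan_output : String) : List (List String) :=
  (((PySem.Str.split? scan_output "\n").getD []).foldl pvStepA (none, [])).2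

-- ===== PORT B =====
def pvRow (ip : Option String) (line : String) : List String :=
  let parts := PySem.Str.split₀ line
  [pvIpVal ip,
   (PySem.List.pyGet?
      ((PySem.Str.split? ((PySem.List.pyGet? parts 0).getD "") "/").getD []) 0).getD "",
   if parts.length > 2 then (PySem.List.pyGet? parts 2).getD "" else "",
   (PySem.List.pyGet? parts 1).getD ""]

-- phase 1 of Source B: split the line list into blocks (ip, segment-lines)
def pvStepB (st : List (Option String × List String) × Option String × List String)
    (line : String) : List (Option String × List String) × Option String × List String :=
  if PySem.Str.isIn "Nmap scan report for" line then
    (st.1 ++ [(st.2.1, st.2.2)], PySem.List.pyGet? (PySem.Str.split₀ line) (-1), [line])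
  else
    (st.1, st.2.1, st.2.2 ++ [line])

-- the rows one block contributes (the body of Source B's final comprehension)
def pvEmit (b : Option String × List String) : List (List String) :=
  (b.2.filter (fun l => PySem.Str.isIn "/tcp" l)).map (pvRow b.1)

def parse_nmap_result_alt (scan_output : String) : List (List String) :=
  let lines := (PySem.Str.split? scan_output "\n").getD []
  let fin := lines.foldl pvStepB ([], none, [])
  let blocks := fin.1 ++ [(fin.2.1, fin.2.2)]
  blocks.flatMap pvEmit

-- ===== PRECONDITION & SPEC =====
-- Pre_ excludes inputs where A raises IndexError (a '/tcp' line with fewer than two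
-- whitespace tokens, parts[1]) and inputs where a '/tcp' line precedes every header,
-- on which A returns a row containing None — not a str, so outside the declared type.
def Pre_parse_nmap_result (scan_output : String) : Prop :=
  ∀ p ∈ ((PySem.Str.split? scan_output "\n").getD []).zipIdx,
    PySem.Str.isIn "/tcp" p.1 = true →
      2 ≤ (PySem.Str.split₀ p.1).length ∧
      (((PySem.Str.split? scan_output "\n").getD []).take (p.2 + 1)).any
        (fun l => PySem.Str.isIn "Nmap scan report for" l) = true
instance (scan_output : String) : Decidable (Pre_parse_nmap_result scan_output) := by
  unfold Pre_parse_nmap_result; infer_instance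

def pvWitness_parse_nmap_result : String :=
  "Nmap scan report for 10.0.0.1\n80/tcp open http\n443/tcp open"

def Spec_parse_nmap_result (scan_output : String) (out : List (List String)) : Prop :=
  out = parse_nmap_result_alt scan_output
instance (scan_output : String) (out : List (List String)) :
    Decidable (Spec_parse_nmap_result scan_output out) := by
  unfold Spec_parse_nmap_result; infer_instance

-- ===== CLAIM (what is proved, stated in full; the proofs are below) =====
def Claim_equal_parse_nmap_result : Prop := ∀ (scan_output : String), Dom_parse_nmap_result scan_output → Pre_parse_nmap_result scan_output → Spec_parse_nmap_result scan_output (parse_nmap_result scan_output)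

-- ===== LEMMAS AND PROOFS =====

-- A's new ip after seeing a line
def pvIpUpd (ip : Option String) (line : String) : Option String :=
  if PySem.Str.isIn "Nmap scan report for" line then
    PySem.List.pyGet? (PySem.Str.split₀ line) (-1)
  else ip

-- the rows a single line contributes, given the current ip
def pvRows1 (ip : Option String) (line : String) : List (List String) :=
  if PySem.Str.isIn "/tcp" line then [pvRow ip line] else []

theorem pvStepA_eq (st : Option String × List (List String)) (line : String) :
    pvStepA st line = (pvIpUpd st.1 line, st.2 ++ pvRows1 (pvIpUpd st.1 line) line) := by
  unfold pvStepA pvIpUpd pvRows1 pvRow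
  split_ifs <;> simp

theorem foldA_acc (ls : List String) (ip : Option String) (acc : List (List String)) :
    ls.foldl pvStepA (ip, acc)
      = ((ls.foldl pvStepA (ip, [])).1, acc ++ (ls.foldl pvStepA (ip, [])).2) := by
  induction ls generalizing ip acc with
  | nil => simp
  | cons l ls ih =>
      simp only [List.foldl_cons, pvStepA_eq, List.nil_append]
      rw [ih (pvIpUpd ip l) (acc ++ pvRows1 (pvIpUpd ip l) l),
          ih (pvIpUpd ip l) (pvRows1 (pvIpUpd ip l) l)]
      simp

theorem pvEmit_snoc (ip : Option String) (seg : List String) (l : String) :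
    pvEmit (ip, seg ++ [l]) = pvEmit (ip, seg) ++ pvRows1 ip l := by
  simp only [pvEmit, pvRows1, List.filter_append, List.filter_cons, List.filter_nil,
    List.map_append]
  cases hh : PySem.Str.isIn "/tcp" l <;> simp

theorem pvEmit_single (ip : Option String) (l : String) :
    pvEmit (ip, [l]) = pvRows1 ip l := by
  have := pvEmit_snoc ip [] l
  simpa [pvEmit] using this

theorem main_lemma (ls : List String) (blocks : List (Option String × List String))
    (ip : Option String) (seg : List String) :
    (let fin := ls.foldl pvStepB (blocks, ip, seg)
     (fin.1 ++ [(fin.2.1, fin.2.2)]).flatMap pvEmit)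
    = blocks.flatMap pvEmit ++ pvEmit (ip, seg) ++ (ls.foldl pvStepA (ip, [])).2 := by
  induction ls generalizing blocks ip seg with
  | nil => simp
  | cons l ls ih =>
      simp only [List.foldl_cons, pvStepA_eq, List.nil_append]
      rw [foldA_acc]
      simp only [pvStepB]
      cases hh : PySem.Str.isIn "Nmap scan report for" l
      · rw [if_neg (by decide)]
        rw [ih]
        have hip : pvIpUpd ip l = ip := by
          unfold pvIpUpd
          rw [if_neg (by simp only [hh, Bool.false_eq_true, not_false_eq_true])]
        rw [hip, pvEmit_snoc]
        simp [List.append_assoc]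
      · rw [if_pos rfl]
        rw [ih]
        have hip : pvIpUpd ip l = PySem.List.pyGet? (PySem.Str.split₀ l) (-1) := by
          unfold pvIpUpd; rw [if_pos hh]
        rw [← hip, pvEmit_single]
        simp [List.flatMap_append, pvEmit, List.append_assoc]

theorem ports_eq (scan_output : String) :
    parse_nmap_result scan_output = parse_nmap_result_alt scan_output := by
  unfold parse_nmap_result parse_nmap_result_alt
  have h := main_lemma ((PySem.Str.split? scan_output "\n").getD []) [] none []
  simp only [List.flatMap_nil, List.nil_append] at h
  rw [h]
  simp [pvEmit]

-- ===== VERDICT (by name: the statement is the Claim_ definition above) =====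
theorem parse_nmap_result_spec : Claim_equal_parse_nmap_result := by
  intro s _ _
  unfold Spec_parse_nmap_result
  exact ports_eq s
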